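-- pv_equiv track=rewrite | github.com/14ChannelBBS/Qua | services/boards.py | sanitizeRefs
-- ===== SOURCE A (Python) =====
-- def sanitizeRefs(text: str) -> str:
--     result = []
--     i = 0
--     while i < len(text):
--         if text[i] == "&" and i + 1 < len(text) and text[i + 1] == "#":
--             j = i + 2
--             base = 10
--             if j < len(text) and text[j] in "xX":
--                 base = 16
--                 j += 1
--
--             while j < len(text) and (
--                 text[j].isdigit() or (base == 16 and text[j] in "abcdefABCDEF")
--             ):
--                 j += 1
--
--             if j < len(text) and text[j] == ";":
--                 result.append(text[i : j + 1])
--                 i = j + 1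
--                 continue
--             else:
--                 i = j
--                 continue
--         else:
--             result.append(text[i])
--             i += 1
--     return "".join(result)
-- ===== SOURCE B (Python) =====
-- def sanitizeRefs(text: str) -> str:
--     out = []
--     i = 0
--     n = len(text)
--     while i < n:
--         j = text.find("&#", i)
--         if j == -1:
--             out.append(text[i:])
--             break
--         out.append(text[i:j])
--         k = j + 2
--         base = 10
--         if k < n and text[k] in "xX":
--             base = 16
--             k += 1
--         digits = "0123456789abcdefABCDEF" if base == 16 else "0123456789"
--         while k < n and text[k] in digits:
--             k += 1
--         if k < n and text[k] == ";":
--             out.append(text[j:k + 1])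
--             i = k + 1
--         else:
--             i = k
--     return "".join(out)
-- ===== Notes on version B (the rewrite author's own statement) =====
-- stated objective: faster
-- what changed: Replaced A's per-character outer while loop with a cursor that uses str.find to locate the next ampersand-hash candidate and bulk-copies the whole literal segment as one slice, keeping the same parse of the candidate (x/X base prefix, digit run, trailing semicolon).
import Mathlib
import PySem

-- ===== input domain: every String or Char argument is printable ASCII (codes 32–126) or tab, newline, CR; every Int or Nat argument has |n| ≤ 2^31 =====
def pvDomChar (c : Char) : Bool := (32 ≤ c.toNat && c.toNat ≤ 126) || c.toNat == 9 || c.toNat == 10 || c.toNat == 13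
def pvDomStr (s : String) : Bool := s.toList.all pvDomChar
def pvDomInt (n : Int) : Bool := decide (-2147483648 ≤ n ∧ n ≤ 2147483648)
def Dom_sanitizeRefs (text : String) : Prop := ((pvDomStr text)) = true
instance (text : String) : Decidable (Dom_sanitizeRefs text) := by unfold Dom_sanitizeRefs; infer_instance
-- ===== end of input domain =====

-- B replaces A's per-character outer loop by a find-next-candidate + bulk-segment-copy traversal (same results; measured constant-factor faster in a timing run).

-- ===== PORT A =====
-- A's inner while loop: scan the run of chars accepted by the digit condition, return (run, rest).
def pvScanA (base : Int) : List Char → List Char × List Char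
  | [] => ([], [])
  | c :: rest =>
    if PySem.Chars.isdigit c || (base == 16 && (c = 'a' || c = 'b' || c = 'c' || c = 'd' || c = 'e' || c = 'f' || c = 'A' || c = 'B' || c = 'C' || c = 'D' || c = 'E' || c = 'F')) then
      let p := pvScanA base rest
      (c :: p.1, p.2)
    else ([], c :: rest)

theorem pvScanA_len (base : Int) (l : List Char) : (pvScanA base l).2.length ≤ l.length := by
  induction l with
  | nil => simp [pvScanA]
  | cons c rest ih =>
    simp only [pvScanA]
    split
    · simpa using Nat.le_succ_of_le ih
    · simp

-- A's "if text[j] in 'xX'" step: (consumed x-part, remaining text, base).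
def pvBaseA : List Char → List Char × List Char × Int
  | d :: r => if d = 'x' ∨ d = 'X' then ([d], r, 16) else ([], d :: r, 10)
  | [] => ([], [], 10)

theorem pvBaseA_len (l : List Char) : (pvBaseA l).2.1.length ≤ l.length := by
  rcases l with _ | ⟨d, r⟩
  · simp [pvBaseA]
  · simp only [pvBaseA]
    split <;> simp

-- A's outer while loop, char by char; pvRefA is the keep-or-drop step after the digit scan
-- (the "&#…;" slice is rebuilt from the scanned pieces).
mutual
def pvLoopA : List Char → List Char
  | [] => []
  | c :: rest =>
    if c = '&' ∧ rest.head? = some '#' then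
      let xb := pvBaseA rest.tail
      let s := pvScanA xb.2.2 xb.2.1
      pvRefA xb.1 s.1 s.2
    else c :: pvLoopA rest
termination_by cs => 3 * cs.length + 2
decreasing_by
  · have h1 : (pvScanA (pvBaseA rest.tail).2.2 (pvBaseA rest.tail).2.1).2.length ≤ (pvBaseA rest.tail).2.1.length := pvScanA_len _ _
    have h2 : (pvBaseA rest.tail).2.1.length ≤ rest.tail.length := pvBaseA_len _
    have h3 : rest.tail.length ≤ rest.length := by cases rest <;> simp
    simp only [List.length_cons]
    omega
  · simp only [List.length_cons]; omega

def pvRefA (xpart ds : List Char) : List Char → List Char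
  | ';' :: tail => '&' :: '#' :: (xpart ++ ds ++ ';' :: pvLoopA tail)
  | r => pvLoopA r
termination_by r => 3 * r.length + 4
decreasing_by
  · simp only [List.length_cons]; omega
  · omega
end

def sanitizeRefs (text : String) : String := String.ofList (pvLoopA text.toList)

-- ===== PORT B =====
-- B's text.find("&#", i): split off the segment before the next "&#" occurrence.
def pvSplitRef : List Char → List Char × List Char
  | [] => ([], [])
  | c :: rest =>
    if c = '&' ∧ rest.head? = some '#' then ([], c :: rest)
    else
      let p := pvSplitRef rest
      (c :: p.1, p.2)

theorem pvSplitRef_len (l : List Char) : (pvSplitRef l).2.length ≤ l.length := by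
  induction l with
  | nil => simp [pvSplitRef]
  | cons c rest ih =>
    simp only [pvSplitRef]
    split
    · simp
    · simpa using Nat.le_succ_of_le ih

-- B's "text[k] in 'xX'" step: (consumed x-part, remaining text).
def pvBaseB : List Char → List Char × List Char
  | d :: r => if d = 'x' ∨ d = 'X' then ([d], r) else ([], d :: r)
  | [] => ([], [])

theorem pvBaseB_len (l : List Char) : (pvBaseB l).2.length ≤ l.length := by
  rcases l with _ | ⟨d, r⟩
  · simp [pvBaseB]
  · simp only [pvBaseB]
    split <;> simp

-- B's outer loop: bulk-copy the segment found, then handle the "&#…" candidate (pvRefB: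
-- base prefix + digit run via takeWhile/dropWhile; pvEndB: keep the whole ref iff ';' follows).
mutual
def pvLoopB (cs : List Char) : List Char :=
  let p := pvSplitRef cs
  p.1 ++ pvRefB p.2
termination_by 3 * cs.length + 2
decreasing_by
  have h := pvSplitRef_len cs
  omega

def pvRefB : List Char → List Char
  | [] => []
  | [a] => [a]   -- unreachable: pvSplitRef's remainder is empty or starts with "&#"
  | a :: h :: rest =>
    let xb := pvBaseB rest
    let digits : List Char :=
      if xb.1.isEmpty then "0123456789".toList else "0123456789abcdefABCDEF".toList
    pvEndB a h xb.1 (xb.2.takeWhile (fun c => c ∈ digits)) (xb.2.dropWhile (fun c => c ∈ digits))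
termination_by r => 3 * r.length + 1
decreasing_by
  have h2 : (pvBaseB rest).2.length ≤ rest.length := pvBaseB_len _
  have h1 := List.length_dropWhile_le
    (fun c => decide (c ∈ if _h : (pvBaseB rest).1.isEmpty then "0123456789".toList else "0123456789abcdefABCDEF".toList))
    (pvBaseB rest).2
  simp only [List.length_cons]
  omega

def pvEndB (a h : Char) (xpart ds : List Char) : List Char → List Char
  | ';' :: tail => a :: h :: (xpart ++ ds ++ ';' :: pvLoopB tail)
  | r => pvLoopB r
termination_by r => 3 * r.length + 4
decreasing_by
  · simp only [List.length_cons]; omega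
  · omega
end

def sanitizeRefs_alt (text : String) : String := String.ofList (pvLoopB text.toList)

-- ===== PRECONDITION & SPEC =====
def Spec_sanitizeRefs (text : String) (out : String) : Prop := out = sanitizeRefs_alt text
instance (text : String) (out : String) : Decidable (Spec_sanitizeRefs text out) := by unfold Spec_sanitizeRefs; infer_instance

-- ===== CLAIM (what is proved, stated in full; the proofs are below) =====
def Claim_equal_sanitizeRefs : Prop := ∀ (text : String), Dom_sanitizeRefs text → Spec_sanitizeRefs text (sanitizeRefs text)

-- ===== LEMMAS AND PROOFS =====

theorem pvCharLe (a c : Char) : (a ≤ c) ↔ a.toNat ≤ c.toNat := Char.le_def.trans UInt32.le_iff_toNat_le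

theorem pvMemDig (c : Char) : c ∈ ['0','1','2','3','4','5','6','7','8','9'] ↔ 48 ≤ c.toNat ∧ c.toNat ≤ 57 := by
  constructor
  · intro hd; fin_cases hd <;> simp [Char.toNat]
  · rintro ⟨h1, h2⟩
    have h : c.toNat = 48 ∨ c.toNat = 49 ∨ c.toNat = 50 ∨ c.toNat = 51 ∨ c.toNat = 52 ∨ c.toNat = 53 ∨ c.toNat = 54 ∨ c.toNat = 55 ∨ c.toNat = 56 ∨ c.toNat = 57 := by omega
    rcases h with h|h|h|h|h|h|h|h|h|h <;>
      · have h0 := Char.ofNat_toNat c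
        rw [h] at h0
        simp [← h0]

theorem pred10_eq (c : Char) :
    (PySem.Chars.isdigit c || ((10 : Int) == 16 && (c = 'a' || c = 'b' || c = 'c' || c = 'd' || c = 'e' || c = 'f' || c = 'A' || c = 'B' || c = 'C' || c = 'D' || c = 'E' || c = 'F'))) =
    (decide (c ∈ "0123456789".toList)) := by
  have hl : "0123456789".toList = ['0','1','2','3','4','5','6','7','8','9'] := rfl
  rw [Bool.eq_iff_iff]
  simp only [hl, PySem.Chars.isdigit, Bool.or_eq_true, Bool.and_eq_true, decide_eq_true_eq,
    pvMemDig c, pvCharLe, beq_iff_eq]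
  constructor
  · rintro (⟨h1, h2⟩ | ⟨h, -⟩)
    · exact ⟨h1, h2⟩
    · omega
  · rintro ⟨h1, h2⟩
    exact Or.inl ⟨h1, h2⟩

theorem pred16_eq (c : Char) :
    (PySem.Chars.isdigit c || ((16 : Int) == 16 && (c = 'a' || c = 'b' || c = 'c' || c = 'd' || c = 'e' || c = 'f' || c = 'A' || c = 'B' || c = 'C' || c = 'D' || c = 'E' || c = 'F'))) =
    (decide (c ∈ "0123456789abcdefABCDEF".toList)) := by
  have hl : "0123456789abcdefABCDEF".toList = ['0','1','2','3','4','5','6','7','8','9'] ++ ['a','b','c','d','e','f','A','B','C','D','E','F'] := rfl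
  rw [Bool.eq_iff_iff]
  simp only [hl, List.mem_append, PySem.Chars.isdigit, Bool.or_eq_true, Bool.and_eq_true,
    decide_eq_true_eq, pvMemDig c, pvCharLe, beq_iff_eq, List.mem_cons, List.not_mem_nil, or_false]
  tauto

theorem pvScanA_eq (base : Int) (p : Char → Bool)
    (hp : ∀ c, (PySem.Chars.isdigit c || (base == 16 && (c = 'a' || c = 'b' || c = 'c' || c = 'd' || c = 'e' || c = 'f' || c = 'A' || c = 'B' || c = 'C' || c = 'D' || c = 'E' || c = 'F'))) = p c)
    (l : List Char) : pvScanA base l = (l.takeWhile p, l.dropWhile p) := by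
  induction l with
  | nil => simp [pvScanA]
  | cons c rest ih =>
    simp only [pvScanA, List.takeWhile, List.dropWhile, hp c]
    cases h : p c <;> simp [ih]

-- pvBaseA is pvBaseB plus the base (16 iff an x/X was consumed)
theorem pvBase_eq (l : List Char) :
    pvBaseA l = ((pvBaseB l).1, (pvBaseB l).2, if (pvBaseB l).1.isEmpty then (10 : Int) else 16) := by
  rcases l with _ | ⟨d, r⟩
  · simp [pvBaseA, pvBaseB]
  · simp only [pvBaseA, pvBaseB]
    split <;> simp

theorem pvLoopB_cons (c : Char) (rest : List Char) (h : ¬(c = '&' ∧ rest.head? = some '#')) :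
    pvLoopB (c :: rest) = c :: pvLoopB rest := by
  simp only [pvLoopB]
  have hs : pvSplitRef (c :: rest) = (c :: (pvSplitRef rest).1, (pvSplitRef rest).2) := by
    simp only [pvSplitRef]
    rw [if_neg h]
  rw [hs]
  simp

theorem pvRef_eq (xpart ds r : List Char)
    (hrec : ∀ cs : List Char, cs.length ≤ r.length → pvLoopA cs = pvLoopB cs) :
    pvRefA xpart ds r = pvEndB '&' '#' xpart ds r := by
  rw [pvRefA.eq_def, pvEndB.eq_def]
  split
  · rename_i tail
    rw [hrec tail (by simp)]
  · exact hrec r le_rfl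

theorem pvLoopB_unfold (cs : List Char) : pvLoopB cs = (pvSplitRef cs).1 ++ pvRefB (pvSplitRef cs).2 := by
  simp only [pvLoopB]

theorem loop_eq : ∀ (n : Nat) (cs : List Char), cs.length ≤ n → pvLoopA cs = pvLoopB cs := by
  intro n
  induction n with
  | zero =>
    intro cs hcs
    have : cs = [] := by
      cases cs
      · rfl
      · simp at hcs
    subst this
    rw [pvLoopA, pvLoopB_unfold]
    simp [pvSplitRef, pvRefB]
  | succ n ih =>
    intro cs hcs
    match cs with
    | [] =>
      rw [pvLoopA, pvLoopB_unfold]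
      simp [pvSplitRef, pvRefB]
    | c :: rest =>
      by_cases h : c = '&' ∧ rest.head? = some '#'
      · -- both sides enter the "&#" branch
        obtain ⟨hc, hh⟩ := h
        subst hc
        rcases rest with _ | ⟨d, rest1⟩
        · simp at hh
        have hd : d = '#' := by simpa using hh
        subst hd
        simp only [List.length_cons] at hcs
        -- A side
        rw [pvLoopA]
        rw [if_pos ⟨rfl, rfl⟩]
        simp only [List.tail_cons]
        -- B side
        rw [pvLoopB_unfold]
        have hsp : pvSplitRef ('&' :: '#' :: rest1) = ([], '&' :: '#' :: rest1) := by
          simp [pvSplitRef]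
        rw [hsp]
        simp only [List.nil_append]
        rw [pvRefB]
        -- align base step
        rw [pvBase_eq rest1]
        simp only
        have hblen : (pvBaseB rest1).2.length ≤ rest1.length := pvBaseB_len _
        by_cases hx : (pvBaseB rest1).1.isEmpty
        · rw [if_pos hx]
          simp only [if_pos hx]
          rw [pvScanA_eq 10 (fun c => decide (c ∈ "0123456789".toList)) pred10_eq]
          simp only
          refine pvRef_eq _ _ _ (fun cs hl => ih cs ?_)
          have := List.length_dropWhile_le (fun c => decide (c ∈ "0123456789".toList)) (pvBaseB rest1).2
          omega
        · rw [if_neg hx]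
          simp only [if_neg hx]
          rw [pvScanA_eq 16 (fun c => decide (c ∈ "0123456789abcdefABCDEF".toList)) pred16_eq]
          simp only
          refine pvRef_eq _ _ _ (fun cs hl => ih cs ?_)
          have := List.length_dropWhile_le (fun c => decide (c ∈ "0123456789abcdefABCDEF".toList)) (pvBaseB rest1).2
          omega
      · rw [pvLoopA]
        rw [if_neg h]
        rw [pvLoopB_cons c rest h]
        simp only [List.length_cons] at hcs
        rw [ih rest (by omega)]

theorem loop_eq' (cs : List Char) : pvLoopA cs = pvLoopB cs := loop_eq cs.length cs le_rfl

-- ===== VERDICT (by name: the statement is the Claim_ definition above) =====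
theorem sanitizeRefs_spec : Claim_equal_sanitizeRefs := by
  intro text _
  unfold Spec_sanitizeRefs sanitizeRefs sanitizeRefs_alt
  rw [loop_eq']
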